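-- pv_equiv track=rewrite | github.com/bitansaha/ds-algo-problems | data_structure/array/max_sum_of_index_and_value_among_all_rotations.py | find_max_sum_of_value_and_index
-- ===== SOURCE A (Python) =====
-- def find_max_sum_of_value_and_index(int_array):
--     value_sum = 0
--     current_index_value_sum = 0
--
--     for index in range(len(int_array)):
--         value_sum += int_array[index]
--         current_index_value_sum += index * int_array[index]
--
--     max_index_value_sum = current_index_value_sum
--
--     for rotation_index in range(1, len(int_array)):
--         previous_index_value_sum = current_index_value_sum
--         current_index_value_sum = previous_index_value_sum + (value_sum - len(int_array) * int_array[len(int_array) -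
--                                                                                                      rotation_index])
--         max_index_value_sum = max(max_index_value_sum, current_index_value_sum)
--
--     return max_index_value_sum
-- ===== SOURCE B (Python) =====
-- def find_max_sum_of_value_and_index(int_array):
--     n = len(int_array)
--     return max(
--         (sum(((k + r) % n) * int_array[k] for k in range(n)) for r in range(n)),
--         default=0,
--     )
-- ===== Notes on version B (the rewrite author's own statement) =====
-- stated objective: simpler
-- what changed: Replaced A's incremental O(1)-per-rotation update (prefix sums plus a rolling recurrence) with a direct brute-force recomputation of each rotation's index*value sum, taking the max with default 0 for the empty list.
import Mathlib
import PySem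

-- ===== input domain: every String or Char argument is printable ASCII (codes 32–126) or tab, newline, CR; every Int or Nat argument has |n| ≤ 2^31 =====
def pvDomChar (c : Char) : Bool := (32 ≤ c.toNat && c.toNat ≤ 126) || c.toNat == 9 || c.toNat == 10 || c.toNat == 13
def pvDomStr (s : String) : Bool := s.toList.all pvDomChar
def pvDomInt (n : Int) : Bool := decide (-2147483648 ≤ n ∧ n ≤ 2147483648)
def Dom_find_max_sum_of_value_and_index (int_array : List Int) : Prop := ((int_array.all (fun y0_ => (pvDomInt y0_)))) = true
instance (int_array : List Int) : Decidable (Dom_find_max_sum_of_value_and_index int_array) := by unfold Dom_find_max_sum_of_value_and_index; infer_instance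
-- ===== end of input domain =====

-- B replaces A's incremental rolling-sum recurrence with a direct brute-force
-- recomputation of each rotation's index*value sum (simpler decomposition, not faster).

-- ===== PORT A =====
-- Transliteration of A. All list indices are in range (index < n; 1 ≤ rI ≤ n-1 so
-- 1 ≤ n - rI ≤ n-1), so `getD _ 0` is exact Python indexing here.
-- range(1, len) is ported as List.range' 1 (n - 1) = [1, …, n-1].
def find_max_sum_of_value_and_index (int_array : List Int) : Int :=
  let n := int_array.length
  let p := (List.range n).foldl
    (fun (p : Int × Int) index =>
      (p.1 + int_array.getD index 0, p.2 + (index : Int) * int_array.getD index 0))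
    (0, 0)
  let q := (List.range' 1 (n - 1)).foldl
    (fun (q : Int × Int) rI =>
      let cur := q.1 + (p.1 - (n : Int) * int_array.getD (n - rI) 0)
      (cur, max q.2 cur))
    (p.2, p.2)
  q.2

-- ===== PORT B =====
-- Transliteration of B: for each rotation r, recompute sum(((k+r)%n) * a[k]) from
-- scratch; max of the sums with default 0. Indices k < n, so `getD _ 0` is exact.
def find_max_sum_of_value_and_index_alt (int_array : List Int) : Int :=
  let n := int_array.length
  let sums := (List.range n).map (fun r =>
    (List.range n).foldl
      (fun s k => s + (((k + r) % n : Nat) : Int) * int_array.getD k 0) 0)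
  match sums with
  | [] => 0
  | x :: xs => xs.foldl max x

-- ===== PRECONDITION & SPEC =====
def Spec_find_max_sum_of_value_and_index (int_array : List Int) (out : Int) : Prop := out = find_max_sum_of_value_and_index_alt int_array
instance (int_array : List Int) (out : Int) : Decidable (Spec_find_max_sum_of_value_and_index int_array out) := by unfold Spec_find_max_sum_of_value_and_index; infer_instance

-- ===== CLAIM (what is proved, stated in full; the proofs are below) =====
def Claim_equal_find_max_sum_of_value_and_index : Prop := ∀ (int_array : List Int), Dom_find_max_sum_of_value_and_index int_array → Spec_find_max_sum_of_value_and_index int_array (find_max_sum_of_value_and_index int_array)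

-- ===== LEMMAS AND PROOFS =====

-- the sum of (rotated index)*(value) for rotation r
def pvS (l : List Int) (r : ℕ) : ℤ :=
  ∑ k ∈ Finset.range l.length, (((k + r) % l.length : ℕ) : ℤ) * l.getD k 0

-- sum of the values
def pvV (l : List Int) : ℤ := ∑ k ∈ Finset.range l.length, l.getD k 0

-- running maximum of pvS over rotations 0..m
def pvM (l : List Int) : ℕ → ℤ
  | 0 => pvS l 0
  | m + 1 => max (pvM l m) (pvS l (m + 1))

theorem pv_mod_small (x n : ℕ) (h : x < 2 * n) :
    x % n = if x < n then x else x - n := by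
  split_ifs with hx
  · exact Nat.mod_eq_of_lt hx
  · rw [Nat.mod_eq_sub_mod (by omega)]
    exact Nat.mod_eq_of_lt (by omega)

theorem pv_sum_foldl (f : ℕ → ℤ) (c : ℤ) (n : ℕ) :
    (List.range n).foldl (fun s k => s + f k) c = c + ∑ k ∈ Finset.range n, f k := by
  induction n generalizing c with
  | zero => simp
  | succ m ih =>
      rw [List.range_succ, List.foldl_append, ih, Finset.sum_range_succ]
      simp [add_assoc]

-- A's first loop computes the value sum and the rotation-0 sum
theorem pv_loopA1 (l : List Int) :
    (List.range l.length).foldl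
      (fun (p : Int × Int) index =>
        (p.1 + l.getD index 0, p.2 + (index : Int) * l.getD index 0)) (0, 0)
      = (pvV l, pvS l 0) := by
  have key : ∀ (n : ℕ) (c d : ℤ),
      (List.range n).foldl
        (fun (p : Int × Int) index =>
          (p.1 + l.getD index 0, p.2 + (index : Int) * l.getD index 0)) (c, d)
        = (c + ∑ k ∈ Finset.range n, l.getD k 0,
           d + ∑ k ∈ Finset.range n, (k : ℤ) * l.getD k 0) := by
    intro n
    induction n with
    | zero => simp
    | succ m ih =>
        intro c d
        rw [List.range_succ, List.foldl_append, ih, Finset.sum_range_succ,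
          Finset.sum_range_succ]
        simp [add_assoc]
  rw [key, pvV, pvS]
  refine Prod.ext (by simp) ?_
  simp only [zero_add]
  refine Finset.sum_congr rfl fun k hk => ?_
  rw [Finset.mem_range] at hk
  rw [Nat.add_zero, Nat.mod_eq_of_lt hk]

-- the rolling recurrence A uses, proved against the direct sums
theorem pv_S_succ (l : List Int) (m : ℕ) (h : m + 1 < l.length) :
    pvS l (m + 1) = pvS l m + (pvV l - (l.length : ℤ) * l.getD (l.length - (m + 1)) 0) := by
  set n := l.length with hn
  have hterm : ∀ k ∈ Finset.range n,
      (((k + (m + 1)) % n : ℕ) : ℤ) * l.getD k 0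
        = (((k + m) % n : ℕ) : ℤ) * l.getD k 0 + l.getD k 0
            - (if k = n - (m + 1) then (n : ℤ) * l.getD k 0 else 0) := by
    intro k hk
    rw [Finset.mem_range] at hk
    by_cases hkey : k = n - (m + 1)
    · have e1 : k + (m + 1) = n := by omega
      have e2 : k + m = n - 1 := by omega
      rw [if_pos hkey, e1, Nat.mod_self, e2, Nat.mod_eq_of_lt (by omega)]
      have : ((n - 1 : ℕ) : ℤ) = (n : ℤ) - 1 := by
        rw [Nat.cast_sub (by omega)]; norm_num
      rw [this]; ring
    · rw [if_neg hkey]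
      by_cases hlt : k + (m + 1) < n
      · rw [Nat.mod_eq_of_lt hlt, Nat.mod_eq_of_lt (by omega)]
        push_cast; ring
      · rw [pv_mod_small (k + (m + 1)) n (by omega), if_neg hlt,
          pv_mod_small (k + m) n (by omega), if_neg (by omega)]
        rw [Nat.cast_sub (by omega), Nat.cast_sub (by omega)]
        push_cast; ring
  rw [pvS, Finset.sum_congr rfl hterm, Finset.sum_sub_distrib, Finset.sum_add_distrib,
    Finset.sum_ite_eq' (Finset.range n) (n - (m + 1)) (fun k => (n : ℤ) * l.getD k 0),
    if_pos (Finset.mem_range.mpr (by omega))]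
  rw [pvS, pvV]; ring

-- A's second loop: invariant (current sum, running max)
theorem pv_loopA2 (l : List Int) (m : ℕ) (h : m ≤ l.length - 1) :
    (List.range' 1 m).foldl
      (fun (q : Int × Int) rI =>
        (q.1 + (pvV l - (l.length : ℤ) * l.getD (l.length - rI) 0),
         max q.2 (q.1 + (pvV l - (l.length : ℤ) * l.getD (l.length - rI) 0))))
      (pvS l 0, pvS l 0)
      = (pvS l m, pvM l m) := by
  induction m with
  | zero => simp [pvM]
  | succ k ih =>
      rw [List.range'_1_concat, List.foldl_append, ih (by omega)]
      simp only [List.foldl_cons, List.foldl_nil]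
      have hk1 : k + 1 < l.length := by omega
      have : 1 + k = k + 1 := by omega
      rw [this, ← pv_S_succ l k hk1, pvM]

-- B's outer max fold equals the running maximum
theorem pv_maxfold (l : List Int) (m : ℕ) :
    ((List.range' 1 m).map (pvS l)).foldl max (pvS l 0) = pvM l m := by
  induction m with
  | zero => simp [pvM]
  | succ k ih =>
      rw [List.range'_1_concat, List.map_append, List.foldl_append, ih]
      simp only [List.map_cons, List.map_nil, List.foldl_cons, List.foldl_nil]
      have : 1 + k = k + 1 := by omega
      rw [this, pvM]

theorem pv_alt_eq (l : List Int) :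
    find_max_sum_of_value_and_index_alt l = pvM l (l.length - 1) := by
  cases hl : l with
  | nil => subst hl; simp [find_max_sum_of_value_and_index_alt, pvM, pvS]
  | cons x xs =>
      rw [← hl]
      have hn : List.range l.length = 0 :: List.range' 1 (l.length - 1) := by
        rw [hl]
        simp [List.range_eq_range', List.range'_succ]
      have hfun : ∀ r : ℕ,
          (List.range l.length).foldl
            (fun s k => s + (((k + r) % l.length : ℕ) : ℤ) * l.getD k 0) 0 = pvS l r := by
        intro r
        rw [pv_sum_foldl (fun k => (((k + r) % l.length : ℕ) : ℤ) * l.getD k 0) 0 l.length,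
          zero_add, pvS]
      unfold find_max_sum_of_value_and_index_alt
      simp only [hfun]
      rw [hn]
      simp only [List.map_cons]
      exact pv_maxfold l (l.length - 1)

theorem pv_A_eq (l : List Int) :
    find_max_sum_of_value_and_index l = pvM l (l.length - 1) := by
  simp only [find_max_sum_of_value_and_index]
  rw [pv_loopA1]
  dsimp only
  exact congrArg Prod.snd (pv_loopA2 l (l.length - 1) le_rfl)

-- ===== VERDICT (by name: the statement is the Claim_ definition above) =====
theorem find_max_sum_of_value_and_index_spec : Claim_equal_find_max_sum_of_value_and_index := by
  intro l _
  unfold Spec_find_max_sum_of_value_and_index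
  rw [pv_A_eq, pv_alt_eq]
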